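-- pv_equiv track=rewrite | github.com/arahim1795/4045_NLP | apps/f_noun_adjective_pair/stanford_utils.py | get_noun_pairs_index
-- ===== SOURCE A (Python) =====
-- INTERESTED_NOUN_POS = ["NN", "NNS", "NNP", "NNPS", "PRP", "PRP$", "WP", "WP$"]
--
-- def get_noun_pairs_index(predicted_heads_and_dependencies):
--     noun_pairs_index = {}
--     for (
--         current_index,
--         predicted_info_of_head,
--     ) in predicted_heads_and_dependencies.items():
--         predicted_heads_index, predicted_dep, predicted_head_pos = predicted_info_of_head[
--             0
--         ]
--         if predicted_head_pos in INTERESTED_NOUN_POS and predicted_dep == "conj":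
--             if predicted_heads_index in noun_pairs_index:
--                 noun_pairs_list = noun_pairs_index[predicted_heads_index]
--                 noun_pairs_list.append(current_index)
--             else:
--                 noun_pairs_index[predicted_heads_index] = [current_index]
--     return noun_pairs_index
-- ===== SOURCE B (Python) =====
-- INTERESTED_NOUN_POS = ["NN", "NNS", "NNP", "NNPS", "PRP", "PRP$", "WP", "WP$"]
--
-- def get_noun_pairs_index(predicted_heads_and_dependencies):
--     # Pass 1: flat list of qualifying (head_index, current_index) pairs.
--     qualifying = [
--         (info[0][0], current_index)
--         for current_index, info in predicted_heads_and_dependencies.items()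
--         if info[0][2] in INTERESTED_NOUN_POS and info[0][1] == "conj"
--     ]
--     # Pass 2: heads in first-occurrence order, each paired with its indices.
--     heads = list(dict.fromkeys(head for head, _ in qualifying))
--     return {head: [i for h, i in qualifying if h == head] for head in heads}
-- ===== Notes on version B (the rewrite author's own statement) =====
-- stated objective: alternative
-- what changed: Replaces A's single pass that mutates per-head lists inside a dict with a two-pass filter-then-group: first collect the flat list of qualifying (head, index) pairs, then build the result by a comprehension over the first-occurrence-deduplicated heads.
import Mathlib
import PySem

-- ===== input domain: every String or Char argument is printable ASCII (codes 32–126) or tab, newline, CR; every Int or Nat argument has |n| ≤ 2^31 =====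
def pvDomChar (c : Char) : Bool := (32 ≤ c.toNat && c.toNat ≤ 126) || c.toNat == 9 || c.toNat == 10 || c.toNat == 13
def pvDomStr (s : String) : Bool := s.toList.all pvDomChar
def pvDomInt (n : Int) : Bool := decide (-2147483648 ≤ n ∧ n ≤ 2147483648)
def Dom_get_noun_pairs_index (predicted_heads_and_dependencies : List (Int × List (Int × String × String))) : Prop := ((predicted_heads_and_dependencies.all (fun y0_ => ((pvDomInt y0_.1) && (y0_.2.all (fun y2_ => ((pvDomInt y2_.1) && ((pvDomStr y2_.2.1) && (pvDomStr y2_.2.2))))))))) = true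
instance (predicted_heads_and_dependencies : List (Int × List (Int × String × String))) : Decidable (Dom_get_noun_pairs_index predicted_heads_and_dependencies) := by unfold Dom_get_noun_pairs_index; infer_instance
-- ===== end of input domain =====

-- B replaces A's single-pass mutable-dict grouping by a filter-then-group two-pass
-- (flat qualifying pairs, first-occurrence heads, per-head comprehension); same result, "alternative" objective.

def INTERESTED_NOUN_POS : List String := ["NN", "NNS", "NNP", "NNPS", "PRP", "PRP$", "WP", "WP$"]

-- ===== PORT A =====
-- the loop body of A: unpack info[0] (pyGetD, exact under Pre_: inner lists nonempty), test, then update the dict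
def npiStep (d : PySem.Dict Int (List Int)) (p : Int × List (Int × String × String)) : PySem.Dict Int (List Int) :=
  let t := PySem.List.pyGetD p.2 0 (0, "", "")
  if INTERESTED_NOUN_POS.contains t.2.2 && t.2.1 == "conj" then
    if d.contains t.1 then
      d.insert t.1 (d.getD t.1 [] ++ [p.1])   -- noun_pairs_list.append(current_index) (in-place)
    else
      d.insert t.1 [p.1]
  else d

def get_noun_pairs_index (predicted_heads_and_dependencies : List (Int × List (Int × String × String))) : List (Int × List Int) :=
  (predicted_heads_and_dependencies.foldl npiStep PySem.Dict.empty).items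

-- ===== PORT B =====
def npiQualifies (p : Int × List (Int × String × String)) : Bool :=
  let t := PySem.List.pyGetD p.2 0 (0, "", "")
  INTERESTED_NOUN_POS.contains t.2.2 && t.2.1 == "conj"

def npiPair (p : Int × List (Int × String × String)) : Int × Int :=
  ((PySem.List.pyGetD p.2 0 (0, "", "")).1, p.1)

def get_noun_pairs_index_alt (predicted_heads_and_dependencies : List (Int × List (Int × String × String))) : List (Int × List Int) :=
  let qualifying := (predicted_heads_and_dependencies.filter npiQualifies).map npiPair
  let heads := PySem.List.dedup (qualifying.map Prod.fst)   -- list(dict.fromkeys(…))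
  heads.map (fun h => (h, (qualifying.filter (fun q => q.1 == h)).map Prod.snd))

-- ===== PRECONDITION & SPEC =====
-- Pre_ excludes inputs where some entry's info list is empty: there A (and B) raise IndexError on info[0].
def Pre_get_noun_pairs_index (predicted_heads_and_dependencies : List (Int × List (Int × String × String))) : Prop :=
  ∀ p ∈ predicted_heads_and_dependencies, p.2 ≠ []
instance (predicted_heads_and_dependencies : List (Int × List (Int × String × String))) : Decidable (Pre_get_noun_pairs_index predicted_heads_and_dependencies) := by unfold Pre_get_noun_pairs_index; infer_instance
def pvWitness_get_noun_pairs_index : (List (Int × List (Int × String × String))) :=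
  [(2, [(5, "conj", "NN")]), (3, [(5, "conj", "NNS")]), (4, [(1, "nsubj", "NN")])]

def Spec_get_noun_pairs_index (predicted_heads_and_dependencies : List (Int × List (Int × String × String))) (out : List (Int × List Int)) : Prop := out = get_noun_pairs_index_alt predicted_heads_and_dependencies
instance (predicted_heads_and_dependencies : List (Int × List (Int × String × String))) (out : List (Int × List Int)) : Decidable (Spec_get_noun_pairs_index predicted_heads_and_dependencies out) := by unfold Spec_get_noun_pairs_index; infer_instance

-- ===== CLAIM (what is proved, stated in full; the proofs are below) =====
def Claim_equal_get_noun_pairs_index : Prop := ∀ (predicted_heads_and_dependencies : List (Int × List (Int × String × String))), Dom_get_noun_pairs_index predicted_heads_and_dependencies → Pre_get_noun_pairs_index predicted_heads_and_dependencies → Spec_get_noun_pairs_index predicted_heads_and_dependencies (get_noun_pairs_index predicted_heads_and_dependencies)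

-- ===== LEMMAS AND PROOFS =====

-- folding a guarded step = folding the plain step over the filtered list
theorem foldl_filter_if {α β : Type} (c : α → Bool) (g : β → α → β) :
    ∀ (l : List α) (d : β),
      l.foldl (fun d x => if c x then g d x else d) d = (l.filter c).foldl g d := by
  intro l
  induction l with
  | nil => intro d; rfl
  | cons x xs ih =>
    intro d
    by_cases h : c x = true <;> simp [h, ih]

-- A's branched update is exactly a Dict.modify with default []
theorem npiStep_eq_modify (d : PySem.Dict Int (List Int)) (p : Int × List (Int × String × String)) :
    npiStep d p = if npiQualifies p then d.modify (npiPair p).1 [] (· ++ [(npiPair p).2]) else d := by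
  unfold npiStep npiQualifies npiPair
  by_cases hq : (INTERESTED_NOUN_POS.contains (PySem.List.pyGetD p.2 0 (0, "", "")).2.2
      && (PySem.List.pyGetD p.2 0 (0, "", "")).2.1 == "conj") = true
  · rw [if_pos hq, if_pos hq]
    by_cases hc : d.contains (PySem.List.pyGetD p.2 0 (0, "", "")).1 = true
    · simp [hc, PySem.Dict.modify]
    · have hc' : d.contains (PySem.List.pyGetD p.2 0 (0, "", "")).1 = false := by
        simpa using hc
      simp [hc, PySem.Dict.modify, PySem.Dict.getD_of_not_contains _ _ hc']
  · rw [if_neg hq, if_neg hq]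

-- the whole A-fold over Q = qualifying pairs
theorem foldA_eq (l : List (Int × List (Int × String × String))) :
    l.foldl npiStep PySem.Dict.empty
      = ((l.filter npiQualifies).map npiPair).foldl
          (fun d q => d.modify q.1 [] (· ++ [q.2])) PySem.Dict.empty := by
  have hf : npiStep
      = fun d p => if npiQualifies p then d.modify (npiPair p).1 [] (· ++ [(npiPair p).2]) else d :=
    funext fun d => funext fun p => npiStep_eq_modify d p
  rw [hf, foldl_filter_if, List.foldl_map]

theorem npi_main : ∀ (l : List (Int × List (Int × String × String))),
    get_noun_pairs_index l = get_noun_pairs_index_alt l := by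
  intro l
  unfold get_noun_pairs_index get_noun_pairs_index_alt
  rw [foldA_eq]
  set Q := (l.filter npiQualifies).map npiPair with hQ
  set D := Q.foldl (fun d q => d.modify q.1 [] (· ++ [q.2])) PySem.Dict.empty with hD
  have hnd : D.keys.Nodup := by
    rw [hD]
    exact PySem.Dict.nodup_keys_foldl_modify_key Q Prod.fst [] (fun _ q => (· ++ [q.2]))
      PySem.Dict.empty PySem.Dict.nodup_keys_empty
  have hkeys : D.keys = PySem.List.dedup (Q.map Prod.fst) := by
    rw [hD]
    rw [PySem.Dict.keys_foldl_modify_key]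
    simp [PySem.Dict.keys_empty, PySem.Set.update_nil_left]
  have hget : ∀ k, D.getD k [] = (Q.filter (fun q => q.1 == k)).map Prod.snd := by
    intro k
    rw [hD, PySem.Dict.getD_foldl_modify_append]
    simp [PySem.Dict.getD_empty]
  rw [PySem.Dict.items_eq_map_keys D hnd []]
  rw [hkeys]
  apply List.map_congr_left
  intro k _
  rw [hget k]

-- ===== VERDICT (by name: the statement is the Claim_ definition above) =====
theorem get_noun_pairs_index_spec : Claim_equal_get_noun_pairs_index := by
  intro l _ _
  exact npi_main l
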